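-- pv_equiv track=rewrite | github.com/PedroMartz89/dam2 | SGE/Python/EjResueltos/Ejercicio_examen_Todo.py | ObtenerCoordenadas
-- ===== SOURCE A (Python) =====
-- def ObtenerCoordenadas(nombres, matriz):
--     diccionario = {}
--     for nombre in nombres:
--         listaCoordenadas = []
--         for fila in range(0, len(matriz)):
--             for columna in range(0, len(matriz)):
--                 if matriz[fila][columna] == nombre:
--                     coordenada = (fila, columna)
--                     listaCoordenadas.append(coordenada)
--         diccionario[nombre] = listaCoordenadas
--     return diccionario
-- ===== SOURCE B (Python) =====
-- def ObtenerCoordenadas(nombres, matriz):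
--     if not nombres:
--         return {}
--     n = len(matriz)
--     indice = {}
--     for r, fila in enumerate(matriz):
--         for c in range(n):
--             indice.setdefault(fila[c], []).append((r, c))
--     return {nom: indice.get(nom, []) for nom in nombres}
-- ===== Notes on version B (the rewrite author's own statement) =====
-- stated objective: faster
-- what changed: B replaces A's per-name full n*n matrix rescan with one enumerate-driven pass over the rows that groups coordinates into a value->coordinates dict (skipped entirely when no names are requested), then answers each name by one dict lookup.
import Mathlib
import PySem

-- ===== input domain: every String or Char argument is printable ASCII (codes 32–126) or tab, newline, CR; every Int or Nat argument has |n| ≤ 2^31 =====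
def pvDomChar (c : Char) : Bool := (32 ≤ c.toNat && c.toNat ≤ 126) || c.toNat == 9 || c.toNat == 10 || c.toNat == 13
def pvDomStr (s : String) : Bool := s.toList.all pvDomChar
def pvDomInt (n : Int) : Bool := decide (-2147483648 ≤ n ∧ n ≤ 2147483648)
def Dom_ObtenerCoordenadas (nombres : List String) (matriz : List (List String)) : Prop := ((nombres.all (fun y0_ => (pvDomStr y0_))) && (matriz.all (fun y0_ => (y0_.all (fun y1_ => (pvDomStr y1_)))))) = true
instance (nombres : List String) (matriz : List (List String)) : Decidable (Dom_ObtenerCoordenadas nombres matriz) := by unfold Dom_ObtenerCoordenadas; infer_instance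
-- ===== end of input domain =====

-- B replaces A's per-name full n×n matrix rescan with one enumerate-driven pass over the rows
-- that groups coordinates into a value→coordinates dict (skipped when no names are requested),
-- answered by one lookup per name (objective: faster, O(k·n²) → O(n²+k)).

-- ===== PORT A =====
def ObtenerCoordenadas (nombres : List String) (matriz : List (List String)) : List (String × List (Int × Int)) :=
  (nombres.foldl (fun diccionario nombre =>
      let listaCoordenadas :=
        (PySem.List.pyRange 0 (matriz.length : Int) 1).foldl (fun lc fila =>
          (PySem.List.pyRange 0 (matriz.length : Int) 1).foldl (fun lc columna =>
            match PySem.List.pyGet? matriz fila with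
            | none => lc            -- IndexError: excluded by Pre_
            | some filaL =>
              match PySem.List.pyGet? filaL columna with
              | none => lc          -- IndexError: excluded by Pre_
              | some v => if v == nombre then lc ++ [(fila, columna)] else lc) lc) []
      diccionario.insert nombre listaCoordenadas)
    PySem.Dict.empty).items

-- ===== PORT B =====
def ObtenerCoordenadas_alt (nombres : List String) (matriz : List (List String)) : List (String × List (Int × Int)) :=
  if nombres = [] then [] else
  let n : Int := matriz.length
  let indice : PySem.Dict String (List (Int × Int)) :=
    (PySem.List.enumerate matriz).foldl (fun acc rf =>
      (PySem.List.pyRange 0 n 1).foldl (fun acc c =>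
        match PySem.List.pyGet? rf.2 c with
        | none => acc               -- IndexError: excluded by Pre_
        | some v => acc.modify v [] (· ++ [(rf.1, c)])) acc) PySem.Dict.empty
  (PySem.Dict.update PySem.Dict.empty (nombres.map (fun nom => (nom, indice.getD nom [])))).items

-- ===== PRECONDITION & SPEC =====
-- Pre_ excludes exactly the inputs on which A raises IndexError: a non-empty name list together
-- with a matrix having some row shorter than len(matriz) (with no names A never touches the matrix).
def Pre_ObtenerCoordenadas (nombres : List String) (matriz : List (List String)) : Prop :=
  nombres = [] ∨ ∀ row ∈ matriz, matriz.length ≤ row.length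
instance (nombres : List String) (matriz : List (List String)) : Decidable (Pre_ObtenerCoordenadas nombres matriz) := by unfold Pre_ObtenerCoordenadas; infer_instance
def pvWitness_ObtenerCoordenadas : List String × List (List String) :=
  (["a", "x"], [["a", "b"], ["b", "a"]])
def Spec_ObtenerCoordenadas (nombres : List String) (matriz : List (List String)) (out : List (String × List (Int × Int))) : Prop := out = ObtenerCoordenadas_alt nombres matriz
instance (nombres : List String) (matriz : List (List String)) (out : List (String × List (Int × Int))) : Decidable (Spec_ObtenerCoordenadas nombres matriz out) := by unfold Spec_ObtenerCoordenadas; infer_instance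

-- ===== CLAIM (what is proved, stated in full; the proofs are below) =====
def Claim_equal_ObtenerCoordenadas : Prop := ∀ (nombres : List String) (matriz : List (List String)), Dom_ObtenerCoordenadas nombres matriz → Pre_ObtenerCoordenadas nombres matriz → Spec_ObtenerCoordenadas nombres matriz (ObtenerCoordenadas nombres matriz)

-- ===== LEMMAS AND PROOFS =====

-- the (total) cell read used to rewrite both ports under Pre_
def pvCell (matriz : List (List String)) (fila columna : Int) : String :=
  (matriz.getD fila.toNat []).getD columna.toNat ""

theorem pvGet_row (matriz : List (List String)) (fila : Int)
    (hf : fila ∈ PySem.List.pyRange 0 (matriz.length : Int) 1) :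
    PySem.List.pyGet? matriz fila = some (matriz.getD fila.toNat []) := by
  rw [PySem.List.mem_pyRange_one] at hf
  rw [PySem.List.pyGet?_of_nonneg matriz hf.1]
  have hlt : fila.toNat < matriz.length := by omega
  rw [List.getElem?_eq_getElem hlt, List.getD_eq_getElem _ _ hlt]

theorem pvGet_cell (matriz : List (List String)) (fila columna : Int)
    (hpre : ∀ row ∈ matriz, matriz.length ≤ row.length)
    (hf : fila ∈ PySem.List.pyRange 0 (matriz.length : Int) 1)
    (hc : columna ∈ PySem.List.pyRange 0 (matriz.length : Int) 1) :
    PySem.List.pyGet? (matriz.getD fila.toNat []) columna = some (pvCell matriz fila columna) := by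
  rw [PySem.List.mem_pyRange_one] at hf hc
  have hflt : fila.toNat < matriz.length := by omega
  have hmem : matriz.getD fila.toNat [] ∈ matriz := by
    rw [List.getD_eq_getElem _ _ hflt]; exact List.getElem_mem hflt
  have hrow := hpre _ hmem
  rw [PySem.List.pyGet?_of_nonneg (matriz.getD fila.toNat []) hc.1]
  have hclt : columna.toNat < (matriz.getD fila.toNat []).length := by omega
  rw [List.getElem?_eq_getElem hclt, pvCell, List.getD_eq_getElem _ _ hclt]

-- A's per-name nested scan, written over the total cell read
theorem pvA_inner (matriz : List (List String)) (nombre : String)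
    (hpre : ∀ row ∈ matriz, matriz.length ≤ row.length) :
    ((PySem.List.pyRange 0 (matriz.length : Int) 1).foldl (fun lc fila =>
        (PySem.List.pyRange 0 (matriz.length : Int) 1).foldl (fun lc columna =>
          match PySem.List.pyGet? matriz fila with
          | none => lc
          | some filaL =>
            match PySem.List.pyGet? filaL columna with
            | none => lc
            | some v => if v == nombre then lc ++ [(fila, columna)] else lc) lc) []) =
      (PySem.List.pyRange 0 (matriz.length : Int) 1).flatMap (fun fila =>
        ((PySem.List.pyRange 0 (matriz.length : Int) 1).filter
            (fun columna => pvCell matriz fila columna == nombre)).map (fun columna => (fila, columna))) := by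
  rw [PySem.List.foldl_congr_mem (g := fun lc fila =>
      lc ++ ((PySem.List.pyRange 0 (matriz.length : Int) 1).filter
          (fun columna => pvCell matriz fila columna == nombre)).map (fun columna => (fila, columna)))]
  · exact PySem.List.foldl_append_eq_flatMap _ _ _
  · intro lc fila hf
    rw [PySem.List.foldl_congr_mem (g := fun lc columna =>
        if pvCell matriz fila columna == nombre then lc ++ [(fila, columna)] else lc)]
    · exact PySem.List.foldl_append_if _ _ _ _
    · intro acc columna hc
      simp only [pvGet_row matriz fila hf, pvGet_cell matriz fila columna hpre hf hc]

-- B's grouping dict, looked up at any name, is exactly A's per-name scan result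
theorem pvB_index (matriz : List (List String)) (nombre : String)
    (hpre : ∀ row ∈ matriz, matriz.length ≤ row.length) :
    (((PySem.List.enumerate matriz).foldl (fun d fr =>
        (PySem.List.pyRange 0 (matriz.length : Int) 1).foldl (fun d columna =>
          match PySem.List.pyGet? fr.2 columna with
          | none => d
          | some v => d.modify v [] (· ++ [(fr.1, columna)])) d)
        (PySem.Dict.empty : PySem.Dict String (List (Int × Int)))).getD nombre []) =
      (PySem.List.pyRange 0 (matriz.length : Int) 1).flatMap (fun fila =>
        ((PySem.List.pyRange 0 (matriz.length : Int) 1).filter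
            (fun columna => pvCell matriz fila columna == nombre)).map (fun columna => (fila, columna))) := by
  rw [PySem.List.enumerate_eq_map_pyRange (d := ([] : List String)), PySem.List.len_eq,
      List.foldl_map]
  rw [PySem.List.foldl_congr_mem (g := fun d fila =>
      ((PySem.List.pyRange 0 (matriz.length : Int) 1).map
          (fun columna => (pvCell matriz fila columna, (fila, columna)))).foldl
        (fun d p => d.modify p.1 [] (· ++ [p.2])) d)]
  · rw [← List.foldl_flatMap, PySem.Dict.getD_foldl_modify_append, PySem.Dict.getD_empty,
        List.nil_append, List.filter_flatMap, List.map_flatMap]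
    apply List.flatMap_congr
    intro fila _
    rw [List.filter_map, List.map_map]
    rfl
  · intro d fila hf
    have hf' := hf
    rw [PySem.List.mem_pyRange_one] at hf'
    have hrowD : PySem.List.pyGetD matriz fila ([] : List String) = matriz.getD fila.toNat [] := by
      rw [PySem.List.pyGetD_eq_getElem matriz ([] : List String) hf'.1 hf'.2,
          List.getD_eq_getElem _ _ (by omega)]
    rw [List.foldl_map]
    exact PySem.List.foldl_congr_mem _ _ _ _ (fun d columna hc => by
      simp only [hrowD, pvGet_cell matriz fila columna hpre hf hc])

-- ===== VERDICT (by name: the statement is the Claim_ definition above) =====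
theorem ObtenerCoordenadas_spec : Claim_equal_ObtenerCoordenadas := by
  intro nombres matriz _ hpre
  unfold Spec_ObtenerCoordenadas ObtenerCoordenadas ObtenerCoordenadas_alt
  by_cases h : nombres = []
  · subst h; rfl
  · rcases hpre with h0 | hpre0
    · exact absurd h0 h
    · rw [if_neg h]
      simp only [PySem.Dict.update, List.foldl_map]
      congr 1
      exact PySem.List.foldl_congr_mem _ _ _ _ (fun d nombre _ => by
        rw [pvA_inner matriz nombre hpre0, pvB_index matriz nombre hpre0])
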